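-- pv_equiv track=rewrite | github.com/igamenovoer/PeiDocker | pei_docker/user_config.py | port_mapping_dict_to_str
-- ===== SOURCE A (Python) =====
-- def port_mapping_dict_to_str(port_mapping: dict[int, int]) -> list[str]:
--     ''' get port mapping from a dict mapping host port to container port to a list of strings in the format 'host:container'
--     '''
--
--     output : list[str] = []
--
--     if len(port_mapping) == 0:
--         return output
--
--     port_from_range_start : int = -1
--     port_to_range_start : int = -1
--     port_from_prev : int = -1
--     port_to_prev : int = -1
--
--     for port_from, port_to in sorted(port_mapping.items()):
--         # first port, initialize the range
--         if port_from_prev == -1: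
--             port_from_range_start = port_from
--             port_to_range_start = port_to
--         elif port_from_prev == port_from - 1 and port_to_prev == port_to - 1:
--             # we are in a range, no need to do anything
--             pass
--         else:
--             # the previous range has ended, add it to the output
--             if port_from_range_start == port_from_prev: # single port
--                 port_mapping_entry : str = f'{port_from_range_start}:{port_to_range_start}'
--                 output.append(port_mapping_entry)
--             else:
--                 port_mapping_entry : str = f'{port_from_range_start}-{port_from_prev}:{port_to_range_start}-{port_to_prev}'
--                 output.append(port_mapping_entry)
--
--             # start a new range
--             port_from_range_start = port_from
--             port_to_range_start = port_to
--
--         # update prev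
--         port_from_prev = port_from
--         port_to_prev = port_to
--
--     # output the last range
--     if port_from_range_start == port_from_prev: # single port
--         port_mapping_entry : str = f'{port_from_range_start}:{port_to_range_start}'
--         output.append(port_mapping_entry)
--     else:
--         port_mapping_entry : str = f'{port_from_range_start}-{port_from_prev}:{port_to_range_start}-{port_to_prev}'
--         output.append(port_mapping_entry)
--
--     return output
-- ===== SOURCE B (Python) =====
-- def port_mapping_dict_to_str(port_mapping: dict[int, int]) -> list[str]:
--     '''same task, two explicit passes: group consecutive (host,container) runs, then format each group'''
--     groups: list[list[tuple[int, int]]] = []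
--     for f, t in sorted(port_mapping.items()):
--         if groups and groups[-1][-1] == (f - 1, t - 1):
--             groups[-1].append((f, t))
--         else:
--             groups.append([(f, t)])
--     output: list[str] = []
--     for g in groups:
--         (f0, t0), (f1, t1) = g[0], g[-1]
--         if len(g) == 1:
--             output.append(f'{f0}:{t0}')
--         else:
--             output.append(f'{f0}-{f1}:{t0}-{t1}')
--     return output
-- ===== Notes on version B (the rewrite author's own statement) =====
-- stated objective: simpler
-- what changed: Replaces A's single fold over five scalar state variables with a duplicated end-of-loop flush by an explicit two-pass decomposition: first partition the sorted items into consecutive-run groups, then format each group from its first and last pair.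
-- intended difference: On dicts that map host port -1 and also some host port greater than -1, A's use of -1 as the 'no previous port' sentinel makes it silently drop the range ending at host port -1 from the output, while B emits a string for every range, which is the intended compression of the mapping. — e.g. on port_mapping_dict_to_str([(-1, 5), (3, 7)]): A returns ["3:7"], B returns ["-1:5", "3:7"]
import Mathlib
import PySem

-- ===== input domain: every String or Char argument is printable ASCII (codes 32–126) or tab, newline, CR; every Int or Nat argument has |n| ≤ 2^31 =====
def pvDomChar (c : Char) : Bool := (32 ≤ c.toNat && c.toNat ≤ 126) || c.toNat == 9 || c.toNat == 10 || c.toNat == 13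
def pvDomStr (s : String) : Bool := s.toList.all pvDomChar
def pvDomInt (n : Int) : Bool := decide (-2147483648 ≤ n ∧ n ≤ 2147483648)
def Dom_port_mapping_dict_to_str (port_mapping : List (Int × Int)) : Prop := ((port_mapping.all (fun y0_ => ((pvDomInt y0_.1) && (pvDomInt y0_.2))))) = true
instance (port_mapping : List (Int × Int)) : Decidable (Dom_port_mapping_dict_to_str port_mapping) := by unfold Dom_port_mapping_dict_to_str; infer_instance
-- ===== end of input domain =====

-- B replaces A's five-scalar fold with duplicated flush by an explicit group-then-format two-pass decomposition (simpler);
-- on dicts containing host port -1 together with a larger host port, A's -1 sentinel drops a range and B keeps it (see D_).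


-- ===== PORT A =====
-- loop body of A's single for-loop; state = (output, from_range_start, to_range_start, from_prev, to_prev)
def pvStepA (s : List String × Int × Int × Int × Int) (pt : Int × Int) : List String × Int × Int × Int × Int :=
  let (output, frs, trs, fp, tp) := s
  let (f, t) := pt
  if fp = -1 then (output, f, t, f, t)
  else if fp = f - 1 ∧ tp = t - 1 then (output, frs, trs, f, t)
  else
    let entry : String :=
      if frs = fp then PySem.Int.toStr frs ++ ":" ++ PySem.Int.toStr trs
      else PySem.Int.toStr frs ++ "-" ++ PySem.Int.toStr fp ++ ":" ++ PySem.Int.toStr trs ++ "-" ++ PySem.Int.toStr tp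
    (output ++ [entry], f, t, f, t)

-- sorted(port_mapping.items()): the dict's items sorted by key (keys of a dict are distinct, so sorting by key is exact)
def port_mapping_dict_to_str (port_mapping : List (Int × Int)) : List String :=
  if port_mapping.length = 0 then []
  else
    let s := (PySem.List.sorted port_mapping Prod.fst false).foldl pvStepA ([], -1, -1, -1, -1)
    let (output, frs, trs, fp, tp) := s
    if frs = fp then output ++ [PySem.Int.toStr frs ++ ":" ++ PySem.Int.toStr trs]
    else output ++ [PySem.Int.toStr frs ++ "-" ++ PySem.Int.toStr fp ++ ":" ++ PySem.Int.toStr trs ++ "-" ++ PySem.Int.toStr tp]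

-- ===== PORT B =====
-- pass 1 loop body: extend the last group when (f,t) continues it, else open a new group
def pvStepB (groups : List (List (Int × Int))) (pt : Int × Int) : List (List (Int × Int)) :=
  let (f, t) := pt
  match groups.getLast? with
  | some g =>
    match g.getLast? with
    | some (pf, pt') =>
        if pf = f - 1 ∧ pt' = t - 1 then groups.dropLast ++ [g ++ [(f, t)]]
        else groups ++ [[(f, t)]]
    | none => groups ++ [[(f, t)]]
  | none => groups ++ [[(f, t)]]

-- pass 2: format one group from its first and last pair (groups are never empty; "" is unreachable)
def pvFmt (g : List (Int × Int)) : String :=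
  match g.head?, g.getLast? with
  | some (f0, t0), some (f1, t1) =>
      if g.length = 1 then PySem.Int.toStr f0 ++ ":" ++ PySem.Int.toStr t0
      else PySem.Int.toStr f0 ++ "-" ++ PySem.Int.toStr f1 ++ ":" ++ PySem.Int.toStr t0 ++ "-" ++ PySem.Int.toStr t1
  | _, _ => ""

def port_mapping_dict_to_str_alt (port_mapping : List (Int × Int)) : List String :=
  (((PySem.List.sorted port_mapping Prod.fst false).foldl pvStepB []).map pvFmt)

-- ===== PRECONDITION & SPEC =====
-- The parameter is a Python dict, whose keys are necessarily distinct; association lists with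
-- duplicate keys represent no Python input, so Pre_ requires the host-port keys to be distinct.
def Pre_port_mapping_dict_to_str (port_mapping : List (Int × Int)) : Prop :=
  (port_mapping.map Prod.fst).Nodup
instance (port_mapping : List (Int × Int)) : Decidable (Pre_port_mapping_dict_to_str port_mapping) := by
  unfold Pre_port_mapping_dict_to_str; infer_instance

def pvWitness_port_mapping_dict_to_str : (List (Int × Int)) := [(80, 8080), (81, 8081), (443, 443)]

-- On dicts that map host port -1 and also some host port greater than -1, A's use of -1 as the
-- 'no previous port' sentinel makes it silently drop the range ending at host port -1, while B
-- emits every range, which is the intended compression of the mapping.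
def D_port_mapping_dict_to_str (port_mapping : List (Int × Int)) : Prop :=
  (∃ p ∈ port_mapping, p.1 = -1) ∧ (∃ q ∈ port_mapping, -1 < q.1)
instance (port_mapping : List (Int × Int)) : Decidable (D_port_mapping_dict_to_str port_mapping) := by
  unfold D_port_mapping_dict_to_str; infer_instance

def Spec_port_mapping_dict_to_str (port_mapping : List (Int × Int)) (out : List String) : Prop :=
  ¬ D_port_mapping_dict_to_str port_mapping → out = port_mapping_dict_to_str_alt port_mapping
instance (port_mapping : List (Int × Int)) (out : List String) : Decidable (Spec_port_mapping_dict_to_str port_mapping out) := by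
  unfold Spec_port_mapping_dict_to_str; infer_instance

def pvDiffWitness_port_mapping_dict_to_str : (List (Int × Int)) := [(-1, 5), (3, 7)]
def pvDiffWitnessOut_port_mapping_dict_to_str : (List String) × (List String) := (["3:7"], ["-1:5", "3:7"])

-- ===== CLAIM (what is proved, stated in full; the proofs are below) =====
def Claim_unchanged_port_mapping_dict_to_str : Prop := ∀ (port_mapping : List (Int × Int)), Dom_port_mapping_dict_to_str port_mapping → Pre_port_mapping_dict_to_str port_mapping → Spec_port_mapping_dict_to_str port_mapping (port_mapping_dict_to_str port_mapping)
def Claim_changed_port_mapping_dict_to_str : Prop := Dom_port_mapping_dict_to_str (pvDiffWitness_port_mapping_dict_to_str) ∧ Pre_port_mapping_dict_to_str (pvDiffWitness_port_mapping_dict_to_str) ∧ D_port_mapping_dict_to_str (pvDiffWitness_port_mapping_dict_to_str) ∧ port_mapping_dict_to_str (pvDiffWitness_port_mapping_dict_to_str) = pvDiffWitnessOut_port_mapping_dict_to_str.1 ∧ port_mapping_dict_to_str_alt (pvDiffWitness_port_mapping_dict_to_str) = pvDiffWitnessOut_port_mapping_dict_to_str.2 ∧ pvDiffWitnessOut_port_mapping_dict_to_str.1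 ≠ pvDiffWitnessOut_port_mapping_dict_to_str.2

-- ===== LEMMAS AND PROOFS =====

-- A's end-of-loop flush, as a function of the final loop state
def pvFinishA (s : List String × Int × Int × Int × Int) : List String :=
  let (output, frs, trs, fp, tp) := s
  if frs = fp then output ++ [PySem.Int.toStr frs ++ ":" ++ PySem.Int.toStr trs]
  else output ++ [PySem.Int.toStr frs ++ "-" ++ PySem.Int.toStr fp ++ ":" ++ PySem.Int.toStr trs ++ "-" ++ PySem.Int.toStr tp]

lemma pvFmt_eq (g : List (Int × Int)) (frs trs fp tp : Int)
    (hh : g.head? = some (frs, trs)) (hl : g.getLast? = some (fp, tp))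
    (hf : fp = frs + g.length - 1) :
    pvFmt g = (if frs = fp then PySem.Int.toStr frs ++ ":" ++ PySem.Int.toStr trs
      else PySem.Int.toStr frs ++ "-" ++ PySem.Int.toStr fp ++ ":" ++ PySem.Int.toStr trs ++ "-" ++ PySem.Int.toStr tp) := by
  have hne : g ≠ [] := by intro h; subst h; simp at hh
  have hlen : 1 ≤ g.length := List.length_pos_iff.mpr hne
  have hiff : g.length = 1 ↔ frs = fp := by omega
  by_cases hc : g.length = 1
  · simp [pvFmt, hh, hl, hc, hiff.mp hc]
  · have h2 : frs ≠ fp := fun h => hc (hiff.mpr h)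
    simp [pvFmt, hh, hl, hc, h2]

lemma pvLoop_eq (rest : List (Int × Int)) :
    ∀ (gs : List (List (Int × Int))) (g : List (Int × Int)) (frs trs fp tp : Int),
    g.head? = some (frs, trs) → g.getLast? = some (fp, tp) →
    fp = frs + g.length - 1 → tp = trs + g.length - 1 →
    (rest ≠ [] → fp ≠ -1) →
    (∀ p ∈ rest.dropLast, p.1 ≠ -1) →
    pvFinishA (rest.foldl pvStepA (gs.map pvFmt, frs, trs, fp, tp)) =
      (rest.foldl pvStepB (gs ++ [g])).map pvFmt := by
  induction rest with
  | nil =>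
    intro gs g frs trs fp tp hh hl hf ht _ _
    simp only [List.foldl_nil, List.map_append, List.map_cons, List.map_nil]
    rw [pvFmt_eq g frs trs fp tp hh hl hf]
    simp only [pvFinishA]
    split_ifs <;> simp
  | cons p rest' ih =>
    intro gs g frs trs fp tp hh hl hf ht h6 h7
    obtain ⟨f, t⟩ := p
    have hne : g ≠ [] := by intro h; subst h; simp at hh
    have hlen : 1 ≤ g.length := List.length_pos_iff.mpr hne
    have hfp : fp ≠ -1 := h6 (by simp)
    -- the hypotheses for the tail
    have h6' : rest' ≠ [] → f ≠ -1 := by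
      intro hne'
      apply h7 (f, t)
      cases rest' with
      | nil => exact absurd rfl hne'
      | cons q rs => rw [List.dropLast_cons₂]; exact List.mem_cons_self
    have h7' : ∀ q ∈ rest'.dropLast, q.1 ≠ -1 := by
      intro q hq
      apply h7 q
      cases rest' with
      | nil => simp at hq
      | cons r rs => rw [List.dropLast_cons₂]; exact List.mem_cons_of_mem _ hq
    -- one step of each loop
    have hAstep : pvStepA (gs.map pvFmt, frs, trs, fp, tp) (f, t) =
        (if fp = f - 1 ∧ tp = t - 1 then (gs.map pvFmt, frs, trs, f, t)
         else ((gs ++ [g]).map pvFmt, f, t, f, t)) := by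
      have hg := pvFmt_eq g frs trs fp tp hh hl hf
      simp only [pvStepA, if_neg hfp]
      split_ifs with hcond h2
      · rfl
      · rw [if_pos h2] at hg
        simp [List.map_append, ← hg]
      · rw [if_neg h2] at hg
        simp [List.map_append, ← hg]
    have hBstep : pvStepB (gs ++ [g]) (f, t) =
        (if fp = f - 1 ∧ tp = t - 1 then gs ++ [g ++ [(f, t)]]
         else (gs ++ [g]) ++ [[(f, t)]]) := by
      simp [pvStepB, hl]
    by_cases hc : fp = f - 1 ∧ tp = t - 1
    · simp only [List.foldl_cons, hAstep, hBstep, if_pos hc]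
      have ihx := ih gs (g ++ [(f, t)]) frs trs f t
        (by cases g with | nil => exact absurd rfl hne | cons a l => simpa using hh)
        List.getLast?_concat
        (by simp; omega) (by simp; omega) h6' h7'
      simpa using ihx
    · simp only [List.foldl_cons, hAstep, hBstep, if_neg hc]
      have ihx := ih (gs ++ [g]) [(f, t)] f t f t rfl rfl (by simp) (by simp) h6' h7'
      simpa using ihx

lemma pvSorted_no_neg_one (pm : List (Int × Int))
    (hnd : Pre_port_mapping_dict_to_str pm) (hD : ¬ D_port_mapping_dict_to_str pm) :
    ∀ p ∈ (PySem.List.sorted pm Prod.fst false).dropLast, p.1 ≠ -1 := by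
  intro p hp hp1
  set ss := PySem.List.sorted pm Prod.fst false with hss
  obtain ⟨i, hi, hip⟩ := List.getElem_of_mem hp
  have hi' : i < ss.length - 1 := by simpa using hi
  have hilen : i < ss.length := by omega
  have hpi : ss[i] = p := by rw [← hip]; exact (List.getElem_dropLast hi).symm
  have hmemp : p ∈ pm := (PySem.List.mem_sorted pm Prod.fst false p).mp (List.mem_of_mem_dropLast hp)
  -- from ¬D_ and the presence of a key -1: every key is ≤ -1
  have hle : ∀ q ∈ pm, q.1 ≤ -1 := by
    intro q hq
    by_contra hgt
    exact hD ⟨⟨p, hmemp, hp1⟩, ⟨q, hq, by omega⟩⟩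
  have hj : ss.length - 1 < ss.length := by omega
  have hmono : Prod.fst (ss[i]'hilen) ≤ Prod.fst (ss[ss.length - 1]'hj) :=
    PySem.List.key_sorted_getElem_mono pm Prod.fst (by omega) hj
  have hlast_mem : ss[ss.length - 1] ∈ pm := (PySem.List.mem_sorted pm Prod.fst false _).mp (List.getElem_mem hj)
  have hlast : (ss[ss.length - 1]'hj).1 = -1 := by
    have := hle _ hlast_mem
    rw [hpi, hp1] at hmono; omega
  -- distinct keys: two positions with key -1 force i = length - 1, contradicting i < length - 1
  have hnd' : (ss.map Prod.fst).Nodup := by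
    have hperm : (ss.map Prod.fst).Perm (pm.map Prod.fst) := (PySem.List.sorted_perm pm Prod.fst false).map Prod.fst
    exact hperm.nodup_iff.mpr hnd
  have hieq : i = ss.length - 1 := by
    have h1 : (ss.map Prod.fst)[i]'(by simpa using hilen) = (ss.map Prod.fst)[ss.length - 1]'(by simpa using hj) := by
      simp only [List.getElem_map]
      rw [hpi, hp1, hlast]
    exact (List.Nodup.getElem_inj_iff hnd').mp h1
  omega

-- ===== VERDICT (by name: the statement is the Claim_ definition above) =====
theorem port_mapping_dict_to_str_spec : Claim_unchanged_port_mapping_dict_to_str := by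
  intro pm _ hpre
  unfold Spec_port_mapping_dict_to_str
  intro hD
  cases hpm : PySem.List.sorted pm Prod.fst false with
  | nil =>
    have hnil : pm = [] := (PySem.List.sorted_eq_nil_iff pm Prod.fst false).mp hpm
    subst hnil
    simp [port_mapping_dict_to_str, port_mapping_dict_to_str_alt, hpm]
  | cons y ys =>
    obtain ⟨f, t⟩ := y
    have hne : pm ≠ [] := by
      intro h
      rw [h] at hpm
      rw [show PySem.List.sorted ([] : List (Int × Int)) Prod.fst false = [] from
        (PySem.List.sorted_eq_nil_iff [] Prod.fst false).mpr rfl] at hpm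
      simp at hpm
    have hlen0 : ¬ pm.length = 0 := by simpa [List.length_eq_zero_iff] using hne
    have hdrop := pvSorted_no_neg_one pm hpre hD
    rw [hpm] at hdrop
    have h6 : ys ≠ [] → f ≠ -1 := by
      intro hne'
      apply hdrop (f, t)
      cases ys with
      | nil => exact absurd rfl hne'
      | cons q rs => rw [List.dropLast_cons₂]; exact List.mem_cons_self
    have h7 : ∀ q ∈ ys.dropLast, q.1 ≠ -1 := by
      intro q hq
      apply hdrop q
      cases ys with
      | nil => simp at hq
      | cons r rs => rw [List.dropLast_cons₂]; exact List.mem_cons_of_mem _ hq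
    have key := pvLoop_eq ys [] [(f, t)] f t f t rfl rfl (by simp) (by simp) h6 h7
    have hA : port_mapping_dict_to_str pm =
        pvFinishA ((PySem.List.sorted pm Prod.fst false).foldl pvStepA ([], -1, -1, -1, -1)) := by
      simp only [port_mapping_dict_to_str, if_neg hlen0]
      rfl
    have hstepA : pvStepA ([], -1, -1, -1, -1) (f, t) = ([], f, t, f, t) := by simp [pvStepA]
    have hstepB : pvStepB [] (f, t) = [[(f, t)]] := by simp [pvStepB]
    rw [hA, port_mapping_dict_to_str_alt, hpm]
    simp only [List.foldl_cons, hstepA, hstepB]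
    simpa using key

theorem port_mapping_dict_to_str_changed : Claim_changed_port_mapping_dict_to_str := by
  unfold Claim_changed_port_mapping_dict_to_str; decide
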